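-- pv_equiv track=rewrite | github.com/sriinu12/Leetcode | 2140-longest-subsequence-repeated-k-times/2140-longest-subsequence-repeated-k-times.py | _is_k_subseq
-- ===== SOURCE A (Python) =====
-- def _is_k_subseq(s: str, cand: str, k: int) -> bool:
--     i, n = 0, len(s)
--     for _ in range(k):
--         for ch in cand:
--             while i < n and s[i] != ch:
--                 i += 1
--             if i == n:
--                 return False
--             i += 1
--     return True
-- ===== SOURCE B (Python) =====
-- def _is_k_subseq(s: str, cand: str, k: int) -> bool:
--     n = len(s)
--     # Subsequence automaton: nxt[i] maps ch -> least index j >= i with s[j] == ch.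
--     nxt = [{}]
--     for i in range(n - 1, -1, -1):
--         d = dict(nxt[-1])
--         d[s[i]] = i
--         nxt.append(d)
--     nxt.reverse()
--     pos = 0
--     for _ in range(k):
--         for ch in cand:
--             j = nxt[pos].get(ch)
--             if j is None:
--                 return False
--             pos = j + 1
--     return True
-- ===== Notes on version B (the rewrite author's own statement) =====
-- stated objective: alternative
-- what changed: Replaced A's on-the-fly inner while-scan of s by a subsequence automaton: one backward preprocessing pass builds a next-occurrence table nxt[i][ch], and the matcher then advances by O(1) table lookups, never scanning s during matching.
import Mathlib
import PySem

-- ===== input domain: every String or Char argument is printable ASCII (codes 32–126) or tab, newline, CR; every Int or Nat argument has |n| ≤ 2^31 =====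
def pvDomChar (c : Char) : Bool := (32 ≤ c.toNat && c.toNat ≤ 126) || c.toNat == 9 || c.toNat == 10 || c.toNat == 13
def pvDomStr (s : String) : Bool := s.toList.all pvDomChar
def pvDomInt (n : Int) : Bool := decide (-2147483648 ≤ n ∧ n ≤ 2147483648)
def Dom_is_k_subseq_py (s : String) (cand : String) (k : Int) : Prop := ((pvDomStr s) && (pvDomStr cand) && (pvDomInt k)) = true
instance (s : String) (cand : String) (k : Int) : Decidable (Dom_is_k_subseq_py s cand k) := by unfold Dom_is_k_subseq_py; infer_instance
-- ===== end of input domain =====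

-- B replaces A's on-the-fly inner while-scan of s by a subsequence automaton: a backward
-- preprocessing pass builds a next-occurrence table, then matching advances by table lookups only.

-- ===== PORT A =====
-- `while i < n and s[i] != ch: i += 1`
def pvWhileA (sl : List Char) (n : Nat) (ch : Char) (i : Nat) : Nat :=
  if h : i < n ∧ sl.getD i ' ' ≠ ch then pvWhileA sl n ch (i + 1) else i
termination_by n - i
decreasing_by omega

-- `for ch in cand: …` (returns none where A returns False)
def pvInnerA (sl : List Char) (n : Nat) : List Char → Nat → Option Nat
  | [], i => some i
  | ch :: cs, i =>
      let i' := pvWhileA sl n ch i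
      if i' = n then none else pvInnerA sl n cs (i' + 1)

-- `for _ in range(k): …`
def pvOuterA (sl : List Char) (n : Nat) (cand : List Char) : Nat → Nat → Option Nat
  | 0, i => some i
  | m + 1, i =>
      match pvInnerA sl n cand i with
      | none => none
      | some i' => pvOuterA sl n cand m i'

def is_k_subseq_py (s : String) (cand : String) (k : Int) : Bool :=
  (pvOuterA s.toList s.toList.length cand.toList k.toNat 0).isSome

-- ===== PORT B =====
-- Source B's table-building loop `for i in range(n-1,-1,-1): nxt.append({**nxt[-1], s[i]: i})`
-- followed by `nxt.reverse()`; ported as the equivalent prepend-to-front recursion on the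
-- loop counter m (after m steps the list holds the tables for indices n-m … n, front first).
def pvBuildB (sl : List Char) (n : Nat) : Nat → List (PySem.Dict Char Nat)
  | 0 => [PySem.Dict.empty]
  | m + 1 =>
      ((pvBuildB sl n m).headD PySem.Dict.empty).insert (sl.getD (n - m - 1) ' ') (n - m - 1)
        :: pvBuildB sl n m

-- `for ch in cand: j = nxt[pos].get(ch); if j is None: return False; pos = j + 1`
def pvInnerB (nxt : List (PySem.Dict Char Nat)) : List Char → Nat → Option Nat
  | [], pos => some pos
  | ch :: cs, pos =>
      match (nxt.getD pos PySem.Dict.empty).get? ch with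
      | none => none
      | some j => pvInnerB nxt cs (j + 1)

-- `for _ in range(k): …`
def pvOuterB (nxt : List (PySem.Dict Char Nat)) (cand : List Char) : Nat → Nat → Option Nat
  | 0, pos => some pos
  | m + 1, pos =>
      match pvInnerB nxt cand pos with
      | none => none
      | some pos' => pvOuterB nxt cand m pos'

def is_k_subseq_py_alt (s : String) (cand : String) (k : Int) : Bool :=
  (pvOuterB (pvBuildB s.toList s.toList.length s.toList.length) cand.toList k.toNat 0).isSome

-- ===== PRECONDITION & SPEC =====
def Spec_is_k_subseq_py (s : String) (cand : String) (k : Int) (out : Bool) : Prop := out = is_k_subseq_py_alt s cand k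
instance (s : String) (cand : String) (k : Int) (out : Bool) : Decidable (Spec_is_k_subseq_py s cand k out) := by unfold Spec_is_k_subseq_py; infer_instance

-- ===== CLAIM (what is proved, stated in full; the proofs are below) =====
def Claim_equal_is_k_subseq_py : Prop := ∀ (s : String) (cand : String) (k : Int), Dom_is_k_subseq_py s cand k → Spec_is_k_subseq_py s cand k (is_k_subseq_py s cand k)

-- ===== LEMMAS AND PROOFS =====

-- reference table for suffix starting at i (what nxt[i] holds)
def pvTbl (sl : List Char) (i : Nat) : PySem.Dict Char Nat :=
  if h : i < sl.length then (pvTbl sl (i + 1)).insert (sl.getD i ' ') i else PySem.Dict.empty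
termination_by sl.length - i
decreasing_by omega

lemma pvBuildB_eq (sl : List Char) : ∀ m, m ≤ sl.length →
    pvBuildB sl sl.length m = (List.range (m + 1)).map (fun j => pvTbl sl (sl.length - m + j)) := by
  intro m
  induction m with
  | zero =>
      intro _
      have h0 : pvTbl sl sl.length = PySem.Dict.empty := by
        rw [pvTbl, dif_neg (by omega)]
      simp [pvBuildB, h0]
  | succ m ih =>
      intro hm
      have hrest := ih (by omega)
      have hhead : (pvBuildB sl sl.length m).headD PySem.Dict.empty = pvTbl sl (sl.length - m) := by
        rw [hrest, List.range_succ_eq_map, List.map_cons]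
        simp
      have hunf : pvTbl sl (sl.length - m - 1)
          = (pvTbl sl (sl.length - m)).insert (sl.getD (sl.length - m - 1) ' ') (sl.length - m - 1) := by
        rw [pvTbl, dif_pos (by omega)]
        congr 2
        omega
      rw [pvBuildB, hhead, ← hunf, hrest,
          List.range_succ_eq_map (n := m + 1), List.map_cons, List.map_map]
      congr 1
      apply List.map_congr_left
      intro j _
      simp only [Function.comp]
      congr 1
      omega

lemma pvNxt_getD (sl : List Char) (i : Nat) (hi : i ≤ sl.length) :
    (pvBuildB sl sl.length sl.length).getD i PySem.Dict.empty = pvTbl sl i := by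
  rw [pvBuildB_eq sl sl.length le_rfl]
  have hlt : i < ((List.range (sl.length + 1)).map (fun j => pvTbl sl (sl.length - sl.length + j))).length := by
    simp; omega
  rw [List.getD_eq_getElem _ _ hlt]
  simp

lemma pvWhileA_le (sl : List Char) (ch : Char) (i : Nat) (hi : i ≤ sl.length) :
    pvWhileA sl sl.length ch i ≤ sl.length := by
  generalize hd : sl.length - i = d
  induction d generalizing i with
  | zero =>
      rw [pvWhileA, dif_neg (by omega)]; omega
  | succ d ih =>
      rw [pvWhileA]
      split
      · exact ih (i + 1) (by omega) (by omega)
      · omega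

lemma pvTbl_get? (sl : List Char) (ch : Char) (i : Nat) :
    (pvTbl sl i).get? ch =
      if pvWhileA sl sl.length ch i < sl.length then some (pvWhileA sl sl.length ch i) else none := by
  generalize hd : sl.length - i = d
  induction d generalizing i with
  | zero =>
      have hge : ¬ i < sl.length := by omega
      have hw : pvWhileA sl sl.length ch i = i := by
        rw [pvWhileA, dif_neg (by omega)]
      rw [pvTbl, dif_neg hge, hw, if_neg hge]
      simp
  | succ d ih =>
      have hi : i < sl.length := by omega
      rw [pvTbl, dif_pos hi]
      by_cases hc : ch = sl.getD i ' '
      · have hw : pvWhileA sl sl.length ch i = i := by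
          rw [pvWhileA, dif_neg (by intro h; exact h.2 hc.symm)]
        rw [hw, if_pos hi, hc, PySem.Dict.get?_insert_self]
      · have hw : pvWhileA sl sl.length ch i = pvWhileA sl sl.length ch (i + 1) := by
          rw [pvWhileA, dif_pos ⟨hi, fun e => hc e.symm⟩]
        rw [PySem.Dict.get?_insert_of_ne _ _ hc, hw]
        exact ih (i + 1) (by omega)

lemma pvInnerB_eq (sl : List Char) (cand : List Char) (i : Nat) (hi : i ≤ sl.length) :
    pvInnerB (pvBuildB sl sl.length sl.length) cand i = pvInnerA sl sl.length cand i := by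
  induction cand generalizing i with
  | nil => rfl
  | cons ch cs ih =>
      have hle := pvWhileA_le sl ch i hi
      rw [pvInnerB, pvNxt_getD sl i hi, pvTbl_get?]
      by_cases hlt : pvWhileA sl sl.length ch i < sl.length
      · rw [if_pos hlt]
        show pvInnerB _ cs (pvWhileA sl sl.length ch i + 1) = _
        rw [ih _ (by omega)]
        simp only [pvInnerA]
        rw [if_neg (by omega)]
      · rw [if_neg hlt]
        show none = pvInnerA sl sl.length (ch :: cs) i
        simp only [pvInnerA]
        rw [if_pos (by omega)]

lemma pvInnerA_le (sl : List Char) (cand : List Char) (i i' : Nat) (hi : i ≤ sl.length)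
    (h : pvInnerA sl sl.length cand i = some i') : i' ≤ sl.length := by
  induction cand generalizing i with
  | nil => simp [pvInnerA] at h; omega
  | cons ch cs ih =>
      simp only [pvInnerA] at h
      split at h
      · exact absurd h (by simp)
      · have hle := pvWhileA_le sl ch i hi
        exact ih _ (by omega) h

lemma pvOuterB_eq (sl : List Char) (cand : List Char) (m i : Nat) (hi : i ≤ sl.length) :
    pvOuterB (pvBuildB sl sl.length sl.length) cand m i = pvOuterA sl sl.length cand m i := by
  induction m generalizing i with
  | zero => rfl
  | succ m ih =>
      rw [pvOuterB, pvOuterA, pvInnerB_eq sl cand i hi]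
      cases h : pvInnerA sl sl.length cand i with
      | none => rfl
      | some i' => exact ih i' (pvInnerA_le sl cand i i' hi h)

-- ===== VERDICT (by name: the statement is the Claim_ definition above) =====
theorem is_k_subseq_py_spec : Claim_equal_is_k_subseq_py := by
  intro s cand k _
  unfold Spec_is_k_subseq_py is_k_subseq_py is_k_subseq_py_alt
  rw [pvOuterB_eq s.toList cand.toList k.toNat 0 (Nat.zero_le _)]
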